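-- pv_equiv track=rewrite | github.com/LleilaA13/Python-practice | exercise17/solution.py | es37
-- ===== SOURCE A (Python) =====
-- def es37(dictionariesList):
--     # I must keep only the keys that appear in at least N/2 dictionaries
--     # so first of all I count them
--     N = len(dictionariesList)
--     count = {}
--     # For each dictionary and for each key, I count how many times the key appears
--     for d in dictionariesList:
--         for k in d:
--             if k in count:
--                 count[k] += 1
--             else:
--                 count[k] = 1
--     # once counted, I collect for each key that appears more than N/2 times
--     # all values common to all dictionaries (merging of value sets)
--     diz = {}
--     for d in dictionariesList:
--         for k, v in d.items():
--             if count[k] >= N/2: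
--                 if k in diz:
--                     diz[k] = diz[k].union(v)
--                 else:
--                     diz[k] = set(v)
--     return diz
-- ===== SOURCE B (Python) =====
-- def es37(dictionariesList):
--     # Count in how many entries each key appears, then build the result
--     # key-by-key: for each eligible key, gather the union of its value lists
--     # across all dictionaries that contain it.
--     N = len(dictionariesList)
--     count = {}
--     for d in dictionariesList:
--         for k in d:
--             count[k] = count.get(k, 0) + 1
--     return {k: set().union(*(d[k] for d in dictionariesList if k in d))
--             for k, c in count.items() if c >= N / 2}
-- ===== Notes on version B (the rewrite author's own statement) =====
-- stated objective: alternative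
-- what changed: The dict-driven second pass (accumulating/unioning into diz while re-walking every dictionary's items) is replaced by a key-driven gather: compute eligible keys once from the count dict, then for each eligible key union d[k] over the dictionaries containing it.
import Mathlib
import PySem

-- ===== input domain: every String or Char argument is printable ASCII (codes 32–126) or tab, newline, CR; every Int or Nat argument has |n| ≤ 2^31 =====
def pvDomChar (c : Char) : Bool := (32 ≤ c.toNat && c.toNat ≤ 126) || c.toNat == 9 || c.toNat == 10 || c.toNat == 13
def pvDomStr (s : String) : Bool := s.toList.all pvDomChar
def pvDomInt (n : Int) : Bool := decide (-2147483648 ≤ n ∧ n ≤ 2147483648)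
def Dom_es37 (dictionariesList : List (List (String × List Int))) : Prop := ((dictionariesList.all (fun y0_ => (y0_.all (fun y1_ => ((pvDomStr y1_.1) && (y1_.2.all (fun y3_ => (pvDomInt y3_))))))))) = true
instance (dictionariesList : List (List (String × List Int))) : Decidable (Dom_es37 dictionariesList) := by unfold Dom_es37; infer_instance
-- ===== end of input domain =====

-- B replaces A's dict-driven second pass (union-accumulating into diz item by item)
-- with a key-driven gather over the eligible keys; equal results, similar cost.

-- ===== PORT A =====
-- 'count[k] >= N/2' with ints: exact as 2*count[k] ≥ N (float halving is exact here)
def es37 (dictionariesList : List (List (String × List Int))) : List (String × List Int) :=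
  let N : Int := dictionariesList.length
  let count : PySem.Dict String Int :=
    dictionariesList.foldl (fun count d =>
      (PySem.Dict.ofList d).keys.foldl (fun count k =>
        if count.contains k then count.insert k (count.getD k 0 + 1)
        else count.insert k 1) count) PySem.Dict.empty
  let diz : PySem.Dict String (PySem.Set Int) :=
    dictionariesList.foldl (fun diz d =>
      (PySem.Dict.ofList d).items.foldl (fun diz kv =>
        if 2 * count.getD kv.1 0 ≥ N then
          if diz.contains kv.1 then diz.insert kv.1 (PySem.Set.union (diz.getD kv.1 []) kv.2)
          else diz.insert kv.1 (PySem.Set.ofList kv.2)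
        else diz) diz) PySem.Dict.empty
  diz.items

-- ===== PORT B =====
-- 'count[k] = count.get(k, 0) + 1' is Dict.modify; result built key-by-key from count
def es37_alt (dictionariesList : List (List (String × List Int))) : List (String × List Int) :=
  let N : Int := dictionariesList.length
  let count : PySem.Dict String Int :=
    dictionariesList.foldl (fun count d =>
      (PySem.Dict.ofList d).keys.foldl (fun count k =>
        count.modify k 0 (· + 1)) count) PySem.Dict.empty
  (count.items.filter (fun kc => decide (2 * kc.2 ≥ N))).map (fun kc =>
    (kc.1, dictionariesList.foldl (fun s d =>
        if (PySem.Dict.ofList d).contains kc.1 then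
          PySem.Set.union s ((PySem.Dict.ofList d).getD kc.1 [])
        else s) PySem.Set.empty))

-- ===== PRECONDITION & SPEC =====
def Spec_es37 (dictionariesList : List (List (String × List Int))) (out : List (String × List Int)) : Prop := out = es37_alt dictionariesList
instance (dictionariesList : List (List (String × List Int))) (out : List (String × List Int)) : Decidable (Spec_es37 dictionariesList out) := by unfold Spec_es37; infer_instance

-- ===== CLAIM (what is proved, stated in full; the proofs are below) =====
def Claim_equal_es37 : Prop := ∀ (dictionariesList : List (List (String × List Int))), Dom_es37 dictionariesList → Spec_es37 dictionariesList (es37 dictionariesList)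

-- ===== LEMMAS AND PROOFS =====

-- helper: filter by key on a nodup-key pair list is find?.toList
theorem filter_key_eq_find {l : List (String × List Int)} {k : String}
    (h : (l.map Prod.fst).Nodup) :
    l.filter (fun kv => kv.1 == k) = (l.find? (fun kv => kv.1 == k)).toList := by
  induction l with
  | nil => rfl
  | cons a t ih =>
    simp only [List.map_cons, List.nodup_cons] at h
    by_cases hk : a.1 = k
    · subst hk
      simp only [List.filter_cons, List.find?_cons, beq_self_eq_true, if_pos, Option.toList_some]
      have : t.filter (fun kv => kv.1 == a.1) = [] := by
        apply List.filter_eq_nil_iff.mpr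
        intro kv hkv hbeq
        have hk1 : kv.1 = a.1 := by simpa using hbeq
        exact h.1 (List.mem_map.mpr ⟨kv, hkv, hk1⟩)
      simp [this]
    · have hb : (a.1 == k) = false := by simpa using hk
      simp [hb, ih h.2]

-- one dict's contribution to the key-k gather equals folding over its key-k items
theorem dict_gather_step (d : List (String × List Int)) (k : String) (s : PySem.Set Int) :
    (if (PySem.Dict.ofList d).contains k then
       PySem.Set.union s ((PySem.Dict.ofList d).getD k [])
     else s)
    = ((PySem.Dict.ofList d).items.filter (fun kv => kv.1 == k)).foldl
        (fun s kv => PySem.Set.union s kv.2) s := by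
  have hnd : ((PySem.Dict.ofList d).items.map Prod.fst).Nodup := by
    simpa [PySem.Dict.keys] using PySem.Dict.nodup_keys_ofList d
  rw [filter_key_eq_find hnd]
  by_cases hc : (PySem.Dict.ofList d).contains k
  · have : ((PySem.Dict.ofList d).items.find? (fun kv => kv.1 == k)).isSome := by
      simpa [PySem.Dict.contains, List.find?_isSome] using hc
    obtain ⟨kv, hkv⟩ := Option.isSome_iff_exists.mp this
    simp [hc, hkv, PySem.Dict.getD, PySem.Dict.get?]
  · have : (PySem.Dict.ofList d).items.find? (fun kv => kv.1 == k) = none := by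
      rw [List.find?_eq_none]
      intro x hx
      by_contra hbeq
      exact hc (by simp only [PySem.Dict.contains, List.any_eq_true]; exact ⟨x, hx, by simpa using hbeq⟩)
    simp [hc, this]

-- key-k gather over the whole list = fold over the flattened key-k items
theorem gather_eq_flat (L : List (List (String × List Int))) (k : String) (s : PySem.Set Int) :
    L.foldl (fun s d =>
        if (PySem.Dict.ofList d).contains k then
          PySem.Set.union s ((PySem.Dict.ofList d).getD k [])
        else s) s
    = ((L.flatMap (fun d => (PySem.Dict.ofList d).items)).filter
        (fun kv => kv.1 == k)).foldl (fun s kv => PySem.Set.union s kv.2) s := by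
  induction L generalizing s with
  | nil => rfl
  | cons d t ih =>
    simp only [List.foldl_cons, List.flatMap_cons, List.filter_append, List.foldl_append]
    rw [← dict_gather_step, ih]

-- the count loop's if/else step is Dict.modify
theorem countStep_eq (c : PySem.Dict String Int) (k : String) :
    (if c.contains k then c.insert k (c.getD k 0 + 1) else c.insert k 1)
    = c.modify k 0 (· + 1) := by
  by_cases h : c.contains k
  · simp [h, PySem.Dict.modify]
  · have h0 : c.getD k 0 = 0 := PySem.Dict.getD_of_not_contains c (0 : Int) (by simpa using h)
    simp [h, PySem.Dict.modify, h0]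

-- nested count loops = Counter of the flattened keys
theorem count_eq_counter (L : List (List (String × List Int)))
    (f : PySem.Dict String Int → String → PySem.Dict String Int)
    (hf : ∀ c k, f c k = c.modify k 0 (· + 1)) :
    L.foldl (fun c d => (PySem.Dict.ofList d).keys.foldl f c) PySem.Dict.empty
    = PySem.Dict.counter (L.flatMap (fun d => (PySem.Dict.ofList d).keys)) := by
  rw [PySem.Dict.counter_eq_foldl, List.foldl_flatMap]
  congr 1
  funext c d
  exact PySem.List.foldl_congr_mem _ _ _ _ (fun acc k _ => hf acc k)

-- A's accumulation into diz, characterised: items = eligible first-appearance keys,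
-- each paired with the fold of its own items
theorem diz_items (ok : String → Prop) [DecidablePred ok] (ps : List (String × List Int)) :
    (ps.foldl (fun z kv =>
        if ok kv.1 then
          if z.contains kv.1 then z.insert kv.1 (PySem.Set.union (z.getD kv.1 []) kv.2)
          else z.insert kv.1 (PySem.Set.ofList kv.2)
        else z) PySem.Dict.empty).items
    = ((PySem.Set.ofList (ps.map Prod.fst)).filter (fun k => decide (ok k))).map
        (fun k => (k, (ps.filter (fun kv => kv.1 == k)).foldl
            (fun s kv => PySem.Set.union s kv.2) PySem.Set.empty)) := by
  induction ps using List.reverseRecOn with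
  | nil => rfl
  | append_singleton ps kv ih =>
    obtain ⟨k, v⟩ := kv
    rw [List.foldl_append]
    set step := fun (z : PySem.Dict String (PySem.Set Int)) (kv : String × List Int) =>
        if ok kv.1 then
          if z.contains kv.1 then z.insert kv.1 (PySem.Set.union (z.getD kv.1 []) kv.2)
          else z.insert kv.1 (PySem.Set.ofList kv.2)
        else z with hstep
    set z := ps.foldl step PySem.Dict.empty with hzdef
    set E := ((PySem.Set.ofList (ps.map Prod.fst)).filter (fun k => decide (ok k))) with hE
    set g := fun (k : String) => (k, (ps.filter (fun kv => kv.1 == k)).foldl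
        (fun s kv => PySem.Set.union s kv.2) PySem.Set.empty) with hg
    have hz : z.items = E.map g := ih
    have hEnodup : E.Nodup := (PySem.Set.nodup_ofList _).filter _
    have hEsub : ∀ k' ∈ E, k' ∈ ps.map Prod.fst := fun k' hk' =>
      (PySem.Set.mem_ofList _ _).mp (List.mem_of_mem_filter hk')
    have hEok : ∀ k' ∈ E, ok k' := fun k' hk' => by
      have := List.of_mem_filter hk'; simpa using this
    -- new key list
    have hkeys : (ps ++ [(k, v)]).map Prod.fst = ps.map Prod.fst ++ [k] := by simp
    have hofl : PySem.Set.ofList (ps.map Prod.fst ++ [k])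
        = PySem.Set.add (PySem.Set.ofList (ps.map Prod.fst)) k := by
      simp [PySem.Set.ofList, List.foldl_append]
    -- per-key gathers over ps ++ [(k,v)]
    have hgather_ne : ∀ k', k' ≠ k →
        ((ps ++ [(k, v)]).filter (fun kv => kv.1 == k')) = ps.filter (fun kv => kv.1 == k') := by
      intro k' hne
      rw [List.filter_append]
      simp [show (k == k') = false by simpa using hne.symm]
    have hgather_eq : ((ps ++ [(k, v)]).filter (fun kv => kv.1 == k))
        = ps.filter (fun kv => kv.1 == k) ++ [(k, v)] := by
      rw [List.filter_append]; simp
    by_cases hok : ok k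
    · by_cases hmem : k ∈ ps.map Prod.fst
      · -- seen before: ofList unchanged, update in place
        have haddc : PySem.Set.add (PySem.Set.ofList (ps.map Prod.fst)) k
            = PySem.Set.ofList (ps.map Prod.fst) := by
          have hc := (PySem.Set.contains_iff (PySem.Set.ofList (ps.map Prod.fst)) k).mpr
            ((PySem.Set.mem_ofList _ _).mpr hmem)
          simp only [PySem.Set.add, hc, if_pos]
        have hkE : k ∈ E := List.mem_filter.mpr
          ⟨(PySem.Set.mem_ofList _ _).mpr hmem, by simpa using hok⟩
        have hcont : z.contains k = true := by
          rw [PySem.Dict.contains, hz]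
          simp only [List.any_eq_true]
          refine ⟨g k, List.mem_map.mpr ⟨k, hkE, rfl⟩, ?_⟩
          simp [hg]
        have hknodup : z.keys.Nodup := by
          have : z.keys = E := by
            rw [PySem.Dict.keys, hz, List.map_map]
            simp [hg, Function.comp_def]
          rw [this]; exact hEnodup
        have hget : z.get? k = some (g k).2 :=
          PySem.Dict.get?_of_mem_items z (by rw [hz]; exact List.mem_map.mpr ⟨k, hkE, rfl⟩) hknodup
        have hgetD : z.getD k [] = (g k).2 := by simp [PySem.Dict.getD, hget]
        simp only [List.foldl_cons, List.foldl_nil, hstep]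
        rw [if_pos hok, if_pos hcont]
        rw [PySem.Dict.items_insert_of_contains z _ hcont, hz, hkeys, hofl, haddc, ← hE,
          List.map_map]
        apply List.map_congr_left
        intro k' hk'
        by_cases hne : k' = k
        · subst hne
          simp [hg, Function.comp, hgather_eq, List.foldl_append, hgetD]
        · simp [hg, Function.comp, show (k' == k) = false by simpa using hne,
            hgather_ne k' hne]
      · -- fresh key: appended
        have hadd : PySem.Set.add (PySem.Set.ofList (ps.map Prod.fst)) k
            = PySem.Set.ofList (ps.map Prod.fst) ++ [k] := by
          have hc : (PySem.Set.ofList (ps.map Prod.fst)).contains k = false := by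
            by_contra h
            exact hmem ((PySem.Set.mem_ofList _ _).mp ((PySem.Set.contains_iff _ _).mp
              (Bool.of_not_eq_false h)))
          simp only [PySem.Set.add, hc, Bool.false_eq_true, if_false]
        have hkE : k ∉ E := fun h => hmem (hEsub k h)
        have hcont : z.contains k = false := by
          rw [PySem.Dict.contains, hz]
          simp only [List.any_eq_false]
          intro p hp
          obtain ⟨k', hk', rfl⟩ := List.mem_map.mp hp
          simp only [hg, beq_iff_eq]
          exact fun h => hkE (h ▸ hk')
        have hfilterps : ps.filter (fun kv => kv.1 == k) = [] := by
          apply List.filter_eq_nil_iff.mpr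
          intro kv hkv hbeq
          have : kv.1 = k := by simpa using hbeq
          exact hmem (this ▸ List.mem_map.mpr ⟨kv, hkv, rfl⟩)
        simp only [List.foldl_cons, List.foldl_nil, hstep]
        rw [if_pos hok, if_neg (by simp [hcont])]
        rw [PySem.Dict.items_insert_of_not_contains z _ hcont, hz, hkeys, hofl, hadd,
          List.filter_append]
        have hfk : List.filter (fun k => decide (ok k)) [k] = [k] := by simp [hok]
        rw [hfk, List.map_append, ← hE]
        congr 1
        · apply List.map_congr_left
          intro k' hk'
          have hne : k' ≠ k := fun h => hkE (h ▸ hk')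
          simp [hg, hgather_ne k' hne]
        · simp only [List.map_cons, List.map_nil]
          rw [hgather_eq, hfilterps]
          rfl
    · -- ineligible key: nothing changes
      simp only [List.foldl_cons, List.foldl_nil, hstep]
      rw [if_neg hok]
      rw [hz, hkeys, hofl]
      have hfilter_add : (PySem.Set.add (PySem.Set.ofList (ps.map Prod.fst)) k).filter
          (fun k => decide (ok k)) = E := by
        by_cases hc : (PySem.Set.ofList (ps.map Prod.fst)).contains k
        · rw [PySem.Set.add, if_pos hc]
        · rw [PySem.Set.add, if_neg hc, List.filter_append]
          simp [hok, ← hE]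
      rw [hfilter_add]
      apply List.map_congr_left
      intro k' hk'
      have hne : k' ≠ k := fun h => hok (h ▸ hEok k' hk')
      simp [hg, hgather_ne k' hne]

theorem es37_eq_alt (L : List (List (String × List Int))) :
    es37 L = es37_alt L := by
  unfold es37 es37_alt
  simp only []
  set N : Int := (L.length : Int) with hN
  set ks := L.flatMap (fun d => (PySem.Dict.ofList d).keys) with hks
  set ps := L.flatMap (fun d => (PySem.Dict.ofList d).items) with hps
  have hkps : ps.map Prod.fst = ks := by
    rw [hks, hps, List.map_flatMap]
    simp [PySem.Dict.keys]
  have hcountA :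
      L.foldl (fun count d => (PySem.Dict.ofList d).keys.foldl (fun count k =>
        if count.contains k then count.insert k (count.getD k 0 + 1)
        else count.insert k 1) count) PySem.Dict.empty = PySem.Dict.counter ks :=
    count_eq_counter L _ countStep_eq
  have hcountB :
      L.foldl (fun count d => (PySem.Dict.ofList d).keys.foldl (fun count k =>
        count.modify k 0 (· + 1)) count) PySem.Dict.empty = PySem.Dict.counter ks :=
    count_eq_counter L _ (fun c k => rfl)
  rw [hcountA, hcountB]
  rw [show (L.foldl (fun diz d => (PySem.Dict.ofList d).items.foldl (fun diz kv =>
        if 2 * (PySem.Dict.counter ks).getD kv.1 0 ≥ N then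
          if diz.contains kv.1 then diz.insert kv.1 (PySem.Set.union (diz.getD kv.1 []) kv.2)
          else diz.insert kv.1 (PySem.Set.ofList kv.2)
        else diz) diz) PySem.Dict.empty)
      = ps.foldl (fun diz kv =>
        if 2 * (PySem.Dict.counter ks).getD kv.1 0 ≥ N then
          if diz.contains kv.1 then diz.insert kv.1 (PySem.Set.union (diz.getD kv.1 []) kv.2)
          else diz.insert kv.1 (PySem.Set.ofList kv.2)
        else diz) PySem.Dict.empty from List.foldl_flatMap.symm]
  rw [diz_items (fun k => 2 * (PySem.Dict.counter ks).getD k 0 ≥ N) ps]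
  rw [PySem.Dict.items_counter ks, List.filter_map, List.map_map]
  rw [hkps]
  have hfil : (fun k => decide (2 * (PySem.Dict.counter ks).getD k 0 ≥ N))
      = ((fun kc : String × Int => decide (2 * kc.2 ≥ N)) ∘ fun k => (k, (ks.count k : Int))) := by
    funext k
    simp [PySem.Dict.getD_counter]
  rw [hfil]
  apply List.map_congr_left
  intro k hk
  simp only [Function.comp]
  rw [gather_eq_flat L k PySem.Set.empty, ← hps]

-- ===== VERDICT (by name: the statement is the Claim_ definition above) =====
theorem es37_spec : Claim_equal_es37 := by
  intro L _
  exact es37_eq_alt L
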